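-- pv_equiv track=rewrite | github.com/DedodatedGraham/SkeletonV1 | Src/Skeletize.py | checkRepeat
-- ===== SOURCE A (Python) =====
-- def checkRepeat(check : list):
--     n = 2 #order of repeat
--     a = False
--     size = len(check)
--     while n < size:
--
--         right = check[size - n : size]
--         left = check[size - 2 * n : size - (n)]
--
--         if right == left:
--             a = True
--             break
--         n = n + 1
--     return a , n
-- ===== SOURCE B (Python) =====
-- def checkRepeat(check: list):
--     size = len(check)
--     r = check[::-1]
--     # Z-function of the reversed list: z[i] = length of the longest common
--     # prefix of r and r[i:].  The suffix blocks check[size-n:] and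
--     # check[size-2n:size-n] are equal exactly when z[n] >= n.
--     z = [0] * size
--     l = rt = 0
--     for i in range(1, size):
--         k = min(rt - i, z[i - l]) if i < rt else 0
--         while i + k < size and r[k] == r[i + k]:
--             k += 1
--         z[i] = k
--         if i + k > rt:
--             l, rt = i, i + k
--     for n in range(2, size // 2 + 1):
--         if z[n] >= n:
--             return True, n
--     return False, max(size, 2)
-- ===== Notes on version B (the rewrite author's own statement) =====
-- stated objective: faster
-- what changed: A compares the two adjacent length-n suffix slices for every n (quadratic); B reverses the list once, computes its Z-function in linear time, and reads off the smallest n>=2 with z[n]>=n.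
import Mathlib
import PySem

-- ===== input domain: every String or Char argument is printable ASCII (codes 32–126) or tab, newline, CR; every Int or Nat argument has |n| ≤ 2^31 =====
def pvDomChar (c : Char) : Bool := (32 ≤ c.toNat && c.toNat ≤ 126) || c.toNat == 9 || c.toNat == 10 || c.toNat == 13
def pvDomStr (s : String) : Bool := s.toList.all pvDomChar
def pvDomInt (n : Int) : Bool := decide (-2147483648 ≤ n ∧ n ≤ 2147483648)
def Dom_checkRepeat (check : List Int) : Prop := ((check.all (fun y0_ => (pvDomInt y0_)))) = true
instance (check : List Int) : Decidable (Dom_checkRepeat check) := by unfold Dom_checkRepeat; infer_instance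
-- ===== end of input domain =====

-- B replaces A's quadratic slice-comparison loop by a Z-function pass over the reversed
-- list followed by a linear scan (objective: faster).

-- ===== PORT A =====
-- A's while loop: n counts up from 2 while n < size, comparing the two adjacent suffix slices
def aLoop (check : List Int) (size : Nat) (n : Nat) : Bool × Int :=
  if n < size then
    let right := PySem.List.slice check (some ((size : Int) - n)) (some (size : Int))
    let left  := PySem.List.slice check (some ((size : Int) - 2 * n)) (some ((size : Int) - n))
    if right = left then (true, (n : Int))
    else aLoop check size (n + 1)
  else (false, (n : Int))
termination_by size - n

def checkRepeat (check : List Int) : Bool × Int := aLoop check check.length 2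

-- ===== PORT B =====
-- Source B's inner "while i + k < size and r[k] == r[i + k]: k += 1"
def zInner (r : List Int) (size i k : Nat) : Nat :=
  if i + k < size then
    if r.getD k 0 = r.getD (i + k) 0 then zInner r size i (k + 1) else k
  else k
termination_by size - (i + k)

-- one iteration of Source B's "for i in range(1, size)"; the state is (z, l, rt)
def zStep (r : List Int) (size : Nat) (st : List Nat × Nat × Nat) (i : Nat) :
    List Nat × Nat × Nat :=
  let k0 := if i < st.2.2 then min (st.2.2 - i) (st.1.getD (i - st.2.1) 0) else 0
  let k := zInner r size i k0
  (st.1.set i k, if st.2.2 < i + k then (i, i + k) else (st.2.1, st.2.2))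

-- the whole Z-function pass of Source B (z starts as [0]*size, l = rt = 0)
def zCompute (r : List Int) (size : Nat) : List Nat :=
  ((List.range' 1 (size - 1)).foldl (zStep r size) (List.replicate size 0, 0, 0)).1

-- Source B's final "for n in range(2, size // 2 + 1)" scan
def scanB (z : List Nat) (size n : Nat) : Bool × Int :=
  if n ≤ size / 2 then
    if n ≤ z.getD n 0 then (true, (n : Int)) else scanB z size (n + 1)
  else (false, ((max size 2 : Nat) : Int))
termination_by size / 2 + 1 - n

def checkRepeat_alt (check : List Int) : Bool × Int :=
  scanB (zCompute check.reverse check.length) check.length 2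

-- ===== PRECONDITION & SPEC =====
def Spec_checkRepeat (check : List Int) (out : Bool × Int) : Prop := out = checkRepeat_alt check
instance (check : List Int) (out : Bool × Int) : Decidable (Spec_checkRepeat check out) := by
  unfold Spec_checkRepeat; infer_instance

-- ===== CLAIM (what is proved, stated in full; the proofs are below) =====
def Claim_equal_checkRepeat : Prop :=
  ∀ (check : List Int), Dom_checkRepeat check → Spec_checkRepeat check (checkRepeat check)

-- ===== LEMMAS AND PROOFS =====

def MatchUpTo (r : List Int) (j k : Nat) : Prop :=
  ∀ m, m < k → r.getD m 0 = r.getD (j + m) 0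
def Lcp (r : List Int) (j : Nat) : Nat := zInner r r.length j 0

lemma zInner_spec (r : List Int) (size i : Nat) :
    ∀ fuel k0, size - (i + k0) ≤ fuel → MatchUpTo r i k0 → i + k0 ≤ size →
      MatchUpTo r i (zInner r size i k0) ∧ i + zInner r size i k0 ≤ size ∧
        (i + zInner r size i k0 < size →
          ¬ r.getD (zInner r size i k0) 0 = r.getD (i + zInner r size i k0) 0) := by
  intro fuel
  induction fuel with
  | zero =>
    intro k0 hf h0 hle
    have hsz : ¬ i + k0 < size := by omega
    rw [zInner, if_neg hsz]
    exact ⟨h0, hle, fun h => absurd h hsz⟩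
  | succ f ih =>
    intro k0 hf h0 hle
    rw [zInner]
    by_cases h1 : i + k0 < size
    · by_cases h2 : r.getD k0 0 = r.getD (i + k0) 0
      · rw [if_pos h1, if_pos h2]
        refine ih (k0 + 1) (by omega) ?_ (by omega)
        intro m hm
        rcases Nat.lt_or_ge m k0 with h | h
        · exact h0 m h
        · have : m = k0 := by omega
          subst this; exact h2
      · rw [if_pos h1, if_neg h2]
        exact ⟨h0, by omega, fun _ => h2⟩
    · rw [if_neg h1]
      exact ⟨h0, hle, fun h => absurd h h1⟩

lemma lcp_props (r : List Int) (j : Nat) (hj : j ≤ r.length) :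
    MatchUpTo r j (Lcp r j) ∧ j + Lcp r j ≤ r.length ∧
      (j + Lcp r j < r.length → ¬ r.getD (Lcp r j) 0 = r.getD (j + Lcp r j) 0) :=
  zInner_spec r r.length j (r.length - j) 0 (by omega) (fun m hm => by omega) (by omega)

lemma lcp_unique (r : List Int) (j k : Nat) (hj : j ≤ r.length)
    (h : MatchUpTo r j k) (hle : j + k ≤ r.length)
    (hm : j + k < r.length → ¬ r.getD k 0 = r.getD (j + k) 0) : k = Lcp r j := by
  obtain ⟨h', hle', hm'⟩ := lcp_props r j hj
  rcases Nat.lt_trichotomy k (Lcp r j) with hlt | heq | hgt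
  · exact absurd (h' k hlt) (hm (by omega))
  · exact heq
  · exact absurd (h (Lcp r j) hgt) (hm' (by omega))

lemma getD_set_ne (z : List Nat) (i j k : Nat) (h : j ≠ i) :
    (z.set i k).getD j 0 = z.getD j 0 := by
  simp [List.getD, List.getElem?_set_ne (by omega : i ≠ j)]

lemma getD_set_self (z : List Nat) (i k : Nat) (h : i < z.length) :
    (z.set i k).getD i 0 = k := by
  simp [List.getD, h]

def ZInv (r : List Int) (i : Nat) (st : List Nat × Nat × Nat) : Prop :=
  st.1.length = r.length ∧
  st.2.1 < i ∧ st.2.1 ≤ st.2.2 ∧ st.2.2 ≤ r.length ∧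
  MatchUpTo r st.2.1 (st.2.2 - st.2.1) ∧
  (∀ j, 1 ≤ j → j < i → st.1.getD j 0 = Lcp r j) ∧
  (∀ j, j = 0 ∨ i ≤ j → st.1.getD j 0 = 0)

lemma zStep_inv (r : List Int) (i : Nat) (st : List Nat × Nat × Nat)
    (hi1 : 1 ≤ i) (hi2 : i < r.length) (h : ZInv r i st) :
    ZInv r (i + 1) (zStep r r.length st i) := by
  obtain ⟨z, l, rt⟩ := st
  dsimp only [ZInv] at h ⊢
  obtain ⟨hlen, hli, hlr, hrs, hbox, hwr, hz0⟩ := h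
  set K := (if i < rt then min (rt - i) (z.getD (i - l) 0) else 0) with hK
  have hKm : MatchUpTo r i K := by
    intro m hm
    by_cases hirt : i < rt
    · rw [hK, if_pos hirt] at hm
      have hm1 : m < rt - i := lt_of_lt_of_le hm (min_le_left _ _)
      have hm2 : m < z.getD (i - l) 0 := lt_of_lt_of_le hm (min_le_right _ _)
      by_cases hl0 : l = 0
      · subst hl0
        rw [Nat.sub_zero, hz0 i (Or.inr le_rfl)] at hm2
        omega
      · have hz' : z.getD (i - l) 0 = Lcp r (i - l) := hwr _ (by omega) (by omega)
        have hlcp := (lcp_props r (i - l) (by omega)).1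
        have e1 : r.getD m 0 = r.getD ((i - l) + m) 0 := hlcp m (by omega)
        have e2 : r.getD ((i - l) + m) 0 = r.getD (l + ((i - l) + m)) 0 :=
          hbox _ (by omega)
        rw [e1, e2]
        congr 1
        omega
    · rw [hK, if_neg hirt] at hm
      omega
  have hKle : i + K ≤ r.length := by
    by_cases hirt : i < rt
    · rw [hK, if_pos hirt]; omega
    · rw [hK, if_neg hirt]; omega
  obtain ⟨hm, hle, hmm⟩ := zInner_spec r r.length i r.length K (by omega) hKm hKle
  have hlcp : zInner r r.length i K = Lcp r i :=
    lcp_unique r i _ (le_of_lt hi2) hm hle hmm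
  set k := zInner r r.length i K with hkdef
  have hstep : zStep r r.length (z, l, rt) i =
      (z.set i k, if rt < i + k then (i, i + k) else (l, rt)) := rfl
  rw [hstep]
  have hwr' : ∀ j, 1 ≤ j → j < i + 1 → (z.set i k).getD j 0 = Lcp r j := by
    intro j hj1 hj2
    by_cases hji : j = i
    · subst hji; rw [getD_set_self z j k (by omega), hlcp]
    · rw [getD_set_ne z i j k hji]; exact hwr j hj1 (by omega)
  have hz0' : ∀ j, j = 0 ∨ i + 1 ≤ j → (z.set i k).getD j 0 = 0 := by
    intro j hj
    rw [getD_set_ne z i j k (by omega)]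
    exact hz0 j (by omega)
  by_cases hbr : rt < i + k
  · rw [if_pos hbr]
    dsimp only
    refine ⟨by simp [hlen], by omega, by omega, hle, ?_, hwr', hz0'⟩
    have : i + k - i = k := by omega
    rw [this]
    exact hm
  · rw [if_neg hbr]
    dsimp only
    exact ⟨by simp [hlen], by omega, hlr, hrs, hbox, hwr', hz0'⟩

lemma zFold_inv (r : List Int) :
    ∀ cnt i st, 1 ≤ i → i + cnt ≤ r.length → ZInv r i st →
      ZInv r (i + cnt) ((List.range' i cnt).foldl (zStep r r.length) st) := by
  intro cnt
  induction cnt with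
  | zero => intro i st _ _ h; simpa using h
  | succ c ih =>
    intro i st hi hle h
    rw [List.range'_succ, List.foldl_cons]
    have := ih (i + 1) (zStep r r.length st i) (by omega) (by omega)
      (zStep_inv r i st hi (by omega) h)
    have he : i + 1 + c = i + (c + 1) := by omega
    rwa [he] at this

lemma zCompute_spec (r : List Int) (size : Nat) (hsz : size = r.length) (h1 : 1 ≤ size) :
    ∀ j, 1 ≤ j → j < size → (zCompute r size).getD j 0 = Lcp r j := by
  subst hsz
  have hinit : ZInv r 1 (List.replicate r.length 0, 0, 0) := by
    dsimp only [ZInv]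
    refine ⟨by simp, by omega, le_rfl, by omega, ?_, ?_, ?_⟩
    · intro m hm; omega
    · intro j hj1 hj2; omega
    · intro j _; simp [List.getD]
  have := zFold_inv r (r.length - 1) 1 (List.replicate r.length 0, 0, 0) le_rfl
    (by omega) hinit
  intro j hj1 hj2
  exact this.2.2.2.2.2.1 j hj1 (by omega)

lemma z_ge_iff (r : List Int) (n : Nat) (h1 : 1 ≤ n) (h2 : n + n ≤ r.length) :
    (n ≤ Lcp r n ↔ MatchUpTo r n n) := by
  obtain ⟨hm, hle, hmm⟩ := lcp_props r n (by omega)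
  constructor
  · intro h m hmn
    exact hm m (by omega)
  · intro h
    by_contra hlt
    exact hmm (by omega) (h (Lcp r n) (by omega))

lemma getD_eq_get (l : List Int) (i : Nat) (h : i < l.length) : l.getD i 0 = l[i] := by
  simp [List.getD_eq_getElem?_getD, List.getElem?_eq_getElem h]

lemma rev_getD (check : List Int) (m : Nat) (h : m < check.length) :
    check.reverse.getD m 0 = check.getD (check.length - 1 - m) 0 := by
  rw [getD_eq_get _ _ (by simpa using h), getD_eq_get _ _ (by omega : check.length - 1 - m < check.length)]
  simp [List.getElem_reverse]

lemma take_drop_eq_iff (check : List Int) (n : Nat) (h1 : 1 ≤ n) (h2 : n + n ≤ check.length) :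
    ((check.drop (check.length - n)).take n = (check.drop (check.length - 2*n)).take n)
    ↔ MatchUpTo check.reverse n n := by
  constructor
  · intro h m hm
    have hj : check[check.length - n + (n-1-m)]? = check[check.length - 2*n + (n-1-m)]? := by
      have hcg := congrArg (fun t => t[(n-1-m)]?) h
      simpa [List.getElem?_take, List.getElem?_drop, show n-1-m < n by omega] using hcg
    have e1 : check.length - n + (n-1-m) = check.length - 1 - m := by omega
    have e2 : check.length - 2*n + (n-1-m) = check.length - 1 - (n+m) := by omega
    rw [e1, e2] at hj
    have hj' : check.getD (check.length - 1 - m) 0 = check.getD (check.length - 1 - (n+m)) 0 := by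
      have := congrArg (fun o => o.getD 0) hj
      simpa [← List.getD_eq_getElem?_getD] using this
    rw [rev_getD check m (by omega), rev_getD check (n+m) (by omega)]
    exact hj'
  · intro h
    apply List.ext_getElem?
    intro j
    by_cases hjn : j < n
    · have hthis := h (n-1-j) (by omega)
      rw [rev_getD check _ (by omega), rev_getD check _ (by omega)] at hthis
      have e1 : check.length - 1 - (n-1-j) = check.length - n + j := by omega
      have e2 : check.length - 1 - (n+(n-1-j)) = check.length - 2*n + j := by omega
      rw [e1, e2] at hthis
      have r1 : check.length - n + j < check.length := by omega
      have r2 : check.length - 2*n + j < check.length := by omega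
      rw [getD_eq_get _ _ r1, getD_eq_get _ _ r2] at hthis
      simp [List.getElem?_drop, hjn,
        List.getElem?_eq_getElem r1, List.getElem?_eq_getElem r2]
      exact hthis
    · rw [List.getElem?_eq_none (by simp; omega), List.getElem?_eq_none (by simp; omega)]

lemma slice_eq_iff (check : List Int) (n : Nat) (h1 : 2 ≤ n) (h2 : n + n ≤ check.length) :
    (PySem.List.slice check (some ((check.length : Int) - n)) (some (check.length : Int)) =
      PySem.List.slice check (some ((check.length : Int) - 2 * n)) (some ((check.length : Int) - n)))
    ↔ MatchUpTo check.reverse n n := by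
  have c1 : (check.length : Int) - n = ((check.length - n : Nat) : Int) := by omega
  have c2 : (check.length : Int) - 2 * n = ((check.length - 2*n : Nat) : Int) := by omega
  rw [c1, c2, PySem.List.slice_natCast, PySem.List.slice_natCast]
  have e1 : check.length - (check.length - n) = n := by omega
  have e2 : (check.length - n) - (check.length - 2*n) = n := by omega
  rw [e1, e2]
  exact take_drop_eq_iff check n (by omega) h2

lemma slice_ne_big (check : List Int) (n : Nat) (hn1 : n < check.length)
    (hn2 : check.length < 2 * n) :
    ¬ (PySem.List.slice check (some ((check.length : Int) - n)) (some (check.length : Int)) =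
      PySem.List.slice check (some ((check.length : Int) - 2 * n)) (some ((check.length : Int) - n))) := by
  intro h
  have hc := congrArg List.length h
  have c1 : (check.length : Int) - n = ((check.length - n : Nat) : Int) := by omega
  have c2 : (check.length : Int) - 2 * n = -((2*n - check.length : Nat) : Int) := by omega
  rw [c1, PySem.List.slice_natCast] at hc
  rw [c2] at hc
  rw [PySem.List.length_slice] at hc
  rw [PySem.List.clampIdx_neg_natCast check.length (2*n - check.length) (by omega)] at hc
  rw [PySem.List.clampIdx_natCast] at hc
  simp at hc
  omega

lemma aLoop_big (check : List Int) :
    ∀ d n, check.length - n ≤ d → check.length / 2 < n → n ≤ check.length →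
      aLoop check check.length n = (false, (check.length : Int)) := by
  intro d
  induction d with
  | zero =>
    intro n hd h1 h2
    rw [aLoop, if_neg (by omega)]
    rw [show n = check.length by omega]
  | succ c ih =>
    intro n hd h1 h2
    by_cases hn : n < check.length
    · rw [aLoop, if_pos hn]
      dsimp only
      rw [if_neg (slice_ne_big check n hn (by omega))]
      exact ih (n+1) (by omega) (by omega) (by omega)
    · rw [aLoop, if_neg hn]
      rw [show n = check.length by omega]

lemma loops_eq (check : List Int) (z : List Nat)
    (hz : ∀ j, 1 ≤ j → j < check.length → z.getD j 0 = Lcp check.reverse j) :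
    ∀ d n, check.length / 2 + 1 - n ≤ d → 2 ≤ n → n ≤ check.length / 2 + 1 →
      aLoop check check.length n = scanB z check.length n := by
  intro d
  induction d with
  | zero =>
    intro n hd h1 h2
    have hc : ¬ n ≤ check.length / 2 := by omega
    rw [scanB, if_neg hc]
    rw [aLoop_big check (check.length - n) n le_rfl (by omega) (by omega)]
    rw [show max check.length 2 = check.length by omega]
  | succ c ih =>
    intro n hd h1 h2
    by_cases hc : n ≤ check.length / 2
    · have hn2 : n + n ≤ check.length := by omega
      have hns : n < check.length := by omega
      rw [aLoop, if_pos hns, scanB, if_pos hc]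
      dsimp only
      rw [hz n (by omega) (by omega)]
      by_cases hq : n ≤ Lcp check.reverse n
      · rw [if_pos ((slice_eq_iff check n h1 hn2).mpr
          ((z_ge_iff check.reverse n (by omega) (by simpa using hn2)).mp hq)), if_pos hq]
      · rw [if_neg (fun hs => hq ((z_ge_iff check.reverse n (by omega) (by simpa using hn2)).mpr
          ((slice_eq_iff check n h1 hn2).mp hs))), if_neg hq]
        exact ih (n+1) (by omega) (by omega) (by omega)
    · have hc2 : ¬ n ≤ check.length / 2 := hc
      rw [scanB, if_neg hc2]
      rw [aLoop_big check (check.length - n) n le_rfl (by omega) (by omega)]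
      rw [show max check.length 2 = check.length by omega]

-- ===== VERDICT (by name: the statement is the Claim_ definition above) =====
theorem checkRepeat_spec : Claim_equal_checkRepeat := by
  intro check _
  unfold Spec_checkRepeat checkRepeat checkRepeat_alt
  by_cases hs : check.length < 2
  · rw [aLoop, if_neg (by omega), scanB, if_neg (by omega)]
    rw [show max check.length 2 = 2 by omega]
  · exact loops_eq check (zCompute check.reverse check.length)
      (zCompute_spec check.reverse check.length (by simp) (by omega))
      (check.length / 2 + 1) 2 (by omega) le_rfl (by omega)
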